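-- pv_equiv track=rewrite | github.com/BartTych/circle_in_discrete_space | chat_gpt.py | all_points_have_two_neighbors
-- ===== SOURCE A (Python) =====
-- _NEIGH = [(-1,-1), (-1,0), (-1,1),
--           ( 0,-1),         ( 0,1),
--           ( 1,-1), ( 1,0), ( 1,1)]
--
-- def all_points_have_two_neighbors(points):
--     s = set(points)
--     for x, y in points:
--         cnt = 0
--         # early exit after reaching 2
--         for dx, dy in _NEIGH:
--             if (x + dx, y + dy) in s:
--                 cnt += 1
--                 if cnt >= 2:
--                     break
--         if cnt < 2:
--             return False
--     return True
-- ===== SOURCE B (Python) =====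
-- _NEIGH = [(-1,-1), (-1,0), (-1,1),
--           ( 0,-1),         ( 0,1),
--           ( 1,-1), ( 1,0), ( 1,1)]
--
-- def all_points_have_two_neighbors(points):
--     s = set(points)
--     counts = {}
--     # scatter: each present point donates 1 to each of its 8 neighbor cells;
--     # by symmetry of the 8-neighborhood, counts[q] = number of present neighbors of q
--     for x, y in s:
--         for dx, dy in _NEIGH:
--             q = (x + dx, y + dy)
--             counts[q] = counts.get(q, 0) + 1
--     return all(counts.get(q, 0) >= 2 for q in s)
-- ===== Notes on version B (the rewrite author's own statement) =====
-- stated objective: alternative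
-- what changed: A gathers per point: for every listed point it scans the 8 offsets against the set with an early exit; B builds a neighbor-count histogram in one scatter pass over the deduplicated point set (each present point adds 1 to each of its 8 neighbor cells, exploiting symmetry of the 8-neighborhood) and then checks every distinct point's count is >= 2.
import Mathlib
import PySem

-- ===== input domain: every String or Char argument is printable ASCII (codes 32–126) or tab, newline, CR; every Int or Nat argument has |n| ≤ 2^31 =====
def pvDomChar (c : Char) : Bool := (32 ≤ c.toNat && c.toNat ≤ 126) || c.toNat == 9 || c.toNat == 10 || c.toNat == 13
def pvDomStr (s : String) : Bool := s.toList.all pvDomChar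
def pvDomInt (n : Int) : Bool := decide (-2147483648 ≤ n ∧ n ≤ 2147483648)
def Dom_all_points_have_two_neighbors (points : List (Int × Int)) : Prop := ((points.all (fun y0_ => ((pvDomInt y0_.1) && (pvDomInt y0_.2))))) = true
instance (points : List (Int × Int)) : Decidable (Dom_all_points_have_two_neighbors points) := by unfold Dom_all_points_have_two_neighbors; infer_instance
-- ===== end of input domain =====

-- B replaces A's per-point gather over the 8 offsets (with early exit) by a one-pass
-- scatter histogram over the deduplicated point set; objective: alternative decomposition.

def pvNeigh : List (Int × Int) :=
  [(-1,-1), (-1,0), (-1,1), (0,-1), (0,1), (1,-1), (1,0), (1,1)]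

-- ===== PORT A =====
-- inner 'for dx, dy in _NEIGH' loop with the 'break' once cnt reaches 2
def pvInnerA (s : PySem.Set (Int × Int)) (x y : Int) : List (Int × Int) → Int → Int
  | [], cnt => cnt
  | o :: rest, cnt =>
    if PySem.Set.contains s (x + o.1, y + o.2) then
      if cnt + 1 ≥ 2 then cnt + 1 else pvInnerA s x y rest (cnt + 1)
    else pvInnerA s x y rest cnt

-- outer 'for x, y in points' loop with the early 'return False'
def pvOuterA (s : PySem.Set (Int × Int)) : List (Int × Int) → Bool
  | [] => true
  | p :: rest => if pvInnerA s p.1 p.2 pvNeigh 0 < 2 then false else pvOuterA s rest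

def all_points_have_two_neighbors (points : List (Int × Int)) : Bool :=
  pvOuterA (PySem.Set.ofList points) points

-- ===== PORT B =====
def all_points_have_two_neighbors_alt (points : List (Int × Int)) : Bool :=
  let s := PySem.Set.ofList points
  let counts : PySem.Dict (Int × Int) Int :=
    s.foldl (fun d p =>
      pvNeigh.foldl (fun d o => d.modify (p.1 + o.1, p.2 + o.2) 0 (· + 1)) d)
      PySem.Dict.empty
  s.all (fun q => decide (counts.getD q 0 ≥ 2))

-- ===== PRECONDITION & SPEC =====
def Spec_all_points_have_two_neighbors (points : List (Int × Int)) (out : Bool) : Prop := out = all_points_have_two_neighbors_alt points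
instance (points : List (Int × Int)) (out : Bool) : Decidable (Spec_all_points_have_two_neighbors points out) := by unfold Spec_all_points_have_two_neighbors; infer_instance

-- ===== CLAIM (what is proved, stated in full; the proofs are below) =====
def Claim_equal_all_points_have_two_neighbors : Prop := ∀ (points : List (Int × Int)), Dom_all_points_have_two_neighbors points → Spec_all_points_have_two_neighbors points (all_points_have_two_neighbors points)

-- ===== LEMMAS AND PROOFS =====

-- number of present 8-neighbors of q (the gather view both sides reduce to)
def pvGather (s : List (Int × Int)) (q : Int × Int) : Nat :=
  pvNeigh.countP (fun o => decide ((q.1 + o.1, q.2 + o.2) ∈ s))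

theorem pvInnerA_ge_two (s : List (Int × Int)) (x y : Int) (offs : List (Int × Int))
    (cnt : Int) (h : cnt < 2) :
    (2 ≤ pvInnerA s x y offs cnt) ↔
      (2 ≤ cnt + (offs.countP (fun o => decide ((x + o.1, y + o.2) ∈ s)) : Int)) := by
  induction offs generalizing cnt with
  | nil => simp [pvInnerA]
  | cons o rest ih =>
    rw [pvInnerA, List.countP_cons]
    by_cases hm : (x + o.1, y + o.2) ∈ s
    · rw [if_pos ((PySem.Set.contains_iff s _).mpr hm)]
      by_cases h2 : cnt + 1 ≥ 2
      · rw [if_pos h2]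
        simp only [hm, decide_true, if_true]
        omega
      · rw [if_neg h2, ih (cnt + 1) (by omega)]
        simp only [hm, decide_true, if_true]
        omega
    · rw [if_neg (fun hc => hm ((PySem.Set.contains_iff s _).mp hc)), ih cnt h]
      simp [hm]

theorem pvOuterA_eq_all (s : List (Int × Int)) (l : List (Int × Int)) :
    pvOuterA s l = l.all (fun q => decide (2 ≤ (pvGather s q : Int))) := by
  induction l with
  | nil => rfl
  | cons p rest ih =>
    have h := pvInnerA_ge_two s p.1 p.2 pvNeigh 0 (by norm_num)
    rw [pvOuterA, List.all_cons, ih]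
    by_cases hg : (2:Int) ≤ (pvGather s p : Int)
    · have h2 : ¬ pvInnerA s p.1 p.2 pvNeigh 0 < 2 := by
        have := h.mpr (by unfold pvGather at hg; omega)
        omega
      rw [if_neg h2]
      simp [hg]
    · have h2 : pvInnerA s p.1 p.2 pvNeigh 0 < 2 := by
        by_contra hc
        exact hg (by
          have := h.mp (by omega)
          unfold pvGather
          omega)
      rw [if_pos h2]
      simp [hg]

-- the histogram value at q is the sum over present points of how many offsets land on q
theorem pv_counts_getD (s : List (Int × Int)) (d : PySem.Dict (Int × Int) Int) (q : Int × Int) :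
    (s.foldl (fun d p =>
        pvNeigh.foldl (fun d o => d.modify (p.1 + o.1, p.2 + o.2) 0 (· + 1)) d) d).getD q 0
      = d.getD q 0 + ((s.map (fun p => ((pvNeigh.map (fun o => (p.1 + o.1, p.2 + o.2))).count q : Int))).sum) := by
  induction s generalizing d with
  | nil => simp
  | cons p rest ih =>
    rw [List.foldl_cons, ih]
    have hfold : (pvNeigh.map (fun o => (p.1 + o.1, p.2 + o.2))).foldl
        (fun d k => d.modify k 0 (· + 1)) d
        = pvNeigh.foldl (fun d o => d.modify (p.1 + o.1, p.2 + o.2) 0 (· + 1)) d := by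
      rw [List.foldl_map]
    rw [← hfold, PySem.Dict.getD_foldl_modify_add_one, List.map_cons, List.sum_cons]
    ring

-- sum of an indicator map is a countP
theorem pv_sum_ite_countP {α : Type} (l : List α) (p : α → Bool) :
    (l.map (fun a => if p a then (1:Nat) else 0)).sum = l.countP p := by
  induction l with
  | nil => rfl
  | cons a t ih => rw [List.map_cons, List.sum_cons, List.countP_cons, ih]; omega

-- exchange the double count over (point, offset) pairs
theorem pv_swap (s : List (Int × Int)) (q : Int × Int) :
    (s.map (fun p => (pvNeigh.map (fun o => (p.1 + o.1, p.2 + o.2))).count q)).sum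
      = (pvNeigh.map (fun o => s.countP (fun p => p == (q.1 - o.1, q.2 - o.2)))).sum := by
  induction s with
  | nil => simp
  | cons p rest ih =>
    rw [List.map_cons, List.sum_cons, ih]
    have hcnt : (pvNeigh.map (fun o => (p.1 + o.1, p.2 + o.2))).count q
        = (pvNeigh.map (fun o => if (p == (q.1 - o.1, q.2 - o.2) : Bool) then (1:Nat) else 0)).sum := by
      rw [List.count_eq_countP, List.countP_map, ← pv_sum_ite_countP]
      congr 1
      apply List.map_congr_left
      intro o _
      have hb : ((p.1 + o.1, p.2 + o.2) == q) = (p == (q.1 - o.1, q.2 - o.2)) := by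
        rw [Bool.eq_iff_iff]
        simp only [beq_iff_eq, Prod.ext_iff]
        constructor <;> (intro ⟨h1, h2⟩; exact ⟨by omega, by omega⟩)
      simp only [Function.comp_apply, hb]
    rw [hcnt, ← List.sum_map_add]
    congr 1
    apply List.map_congr_left
    intro o _
    rw [List.countP_cons]
    omega

-- on a nodup list the equality-countP is a membership indicator
theorem pv_countP_nodup (s : List (Int × Int)) (hnd : s.Nodup) (a : Int × Int) :
    s.countP (fun p => p == a) = if a ∈ s then 1 else 0 := by
  rw [← List.count_eq_countP]
  by_cases hm : a ∈ s
  · rw [if_pos hm]; exact List.count_eq_one_of_mem hnd hm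
  · rw [if_neg hm]; exact List.count_eq_zero_of_not_mem hm

-- symmetry of the 8-neighborhood: negating the offsets reverses the list
theorem pv_sym (s : List (Int × Int)) (q : Int × Int) :
    pvNeigh.countP (fun o => decide ((q.1 - o.1, q.2 - o.2) ∈ s)) = pvGather s q := by
  have hrev : pvNeigh.map (fun o => (-o.1, -o.2)) = pvNeigh.reverse := by decide
  unfold pvGather
  calc pvNeigh.countP (fun o => decide ((q.1 - o.1, q.2 - o.2) ∈ s))
      = (pvNeigh.map (fun o => (-o.1, -o.2))).countP (fun o => decide ((q.1 + o.1, q.2 + o.2) ∈ s)) := by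
        rw [List.countP_map]
        apply List.countP_congr
        intro o _
        simp only [Function.comp_apply, sub_eq_add_neg]
    _ = pvNeigh.countP (fun o => decide ((q.1 + o.1, q.2 + o.2) ∈ s)) := by
        rw [hrev, List.countP_reverse]

-- the histogram at q equals the gather count, on a nodup point list
theorem pv_hist_eq_gather (s : List (Int × Int)) (hnd : s.Nodup) (q : Int × Int) :
    (s.foldl (fun d p =>
        pvNeigh.foldl (fun d o => d.modify (p.1 + o.1, p.2 + o.2) 0 (· + 1)) d)
        PySem.Dict.empty).getD q 0 = (pvGather s q : Int) := by
  rw [pv_counts_getD, PySem.Dict.getD_empty, zero_add]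
  have hcast : (s.map (fun p => ((pvNeigh.map (fun o => (p.1 + o.1, p.2 + o.2))).count q : Int))).sum
      = (((s.map (fun p => (pvNeigh.map (fun o => (p.1 + o.1, p.2 + o.2))).count q)).sum : Nat) : Int) := by
    rw [Nat.cast_list_sum, List.map_map]
    rfl
  rw [hcast]
  congr 1
  rw [pv_swap]
  have h1 : pvNeigh.map (fun o => s.countP (fun p => p == (q.1 - o.1, q.2 - o.2)))
      = pvNeigh.map (fun o => if ((q.1 - o.1, q.2 - o.2) ∈ s : Prop) then (1:Nat) else 0) := by
    apply List.map_congr_left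
    intro o _
    rw [pv_countP_nodup s hnd]
  rw [h1]
  have h2 : pvNeigh.map (fun o => if ((q.1 - o.1, q.2 - o.2) ∈ s : Prop) then (1:Nat) else 0)
      = pvNeigh.map (fun o => if (decide ((q.1 - o.1, q.2 - o.2) ∈ s) : Bool) then (1:Nat) else 0) := by
    simp
  rw [h2, pv_sum_ite_countP, pv_sym]

theorem pv_all_ofList (xs : List (Int × Int)) (p : Int × Int → Bool) :
    (PySem.Set.ofList xs).all p = xs.all p := by
  rw [Bool.eq_iff_iff]
  simp only [List.all_eq_true]
  constructor
  · intro h x hx; exact h x ((PySem.Set.mem_ofList xs x).mpr hx)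
  · intro h x hx; exact h x ((PySem.Set.mem_ofList xs x).mp hx)

theorem all_points_have_two_neighbors_spec : Claim_equal_all_points_have_two_neighbors := by
  intro points _
  unfold Spec_all_points_have_two_neighbors
  simp only [all_points_have_two_neighbors, all_points_have_two_neighbors_alt]
  rw [pvOuterA_eq_all]
  have hB : (List.all (PySem.Set.ofList points) fun q =>
      decide (((PySem.Set.ofList points).foldl (fun d p =>
        pvNeigh.foldl (fun d o => d.modify (p.1 + o.1, p.2 + o.2) 0 (· + 1)) d)
        (PySem.Dict.empty : PySem.Dict (Int × Int) Int)).getD q 0 ≥ 2))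
      = List.all (PySem.Set.ofList points)
          (fun q => decide (2 ≤ (pvGather (PySem.Set.ofList points) q : Int))) := by
    simp only [pv_hist_eq_gather (PySem.Set.ofList points) (PySem.Set.nodup_ofList points),
      ge_iff_le]
  rw [hB, pv_all_ofList]
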